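-- pv_equiv track=rewrite | github.com/tuvo1106/reach_mastermind | mastermind/utils/str_validator.py | is_alpha_or_space
-- ===== SOURCE A (Python) =====
-- def is_alpha_or_space(string: str) -> bool:
--     """
--     Determines if given string has only alphabet characters or spaces.
--     Returns true if it has at least one letter.
--     """
--     one_letter = False
--     for c in list(string):
--         if c == " ":
--             continue
--         if not c.isalpha():
--             return False
--         one_letter = True
--     return one_letter
-- ===== SOURCE B (Python) =====
-- def is_alpha_or_space(string: str) -> bool:
--     """
--     Determines if given string has only alphabet characters or spaces.
--     Returns true if it has at least one letter.
--     """
--     return string.replace(" ", "").isalpha()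
-- ===== Notes on version B (the rewrite author's own statement) =====
-- stated objective: simpler
-- what changed: Replaced the stateful single-pass scan with a flag and early return by a transform-then-validate one-liner: strip spaces with str.replace and let str.isalpha (False on empty) enforce both conditions.
import Mathlib
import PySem

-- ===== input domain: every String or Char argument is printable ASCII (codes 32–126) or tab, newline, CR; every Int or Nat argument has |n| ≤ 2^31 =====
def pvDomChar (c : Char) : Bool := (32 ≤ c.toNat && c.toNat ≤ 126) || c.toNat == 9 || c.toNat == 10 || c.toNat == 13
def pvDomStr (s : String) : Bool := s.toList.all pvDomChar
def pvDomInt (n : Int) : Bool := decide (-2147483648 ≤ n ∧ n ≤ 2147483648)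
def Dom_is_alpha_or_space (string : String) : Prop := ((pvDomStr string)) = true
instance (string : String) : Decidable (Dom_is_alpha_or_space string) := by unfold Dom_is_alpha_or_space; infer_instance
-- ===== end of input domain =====

-- B replaces A's stateful scan (flag + early return) by transform-then-validate:
-- remove spaces with str.replace, then str.isalpha (False on empty) — simpler, same cost.


-- ===== PORT A =====
-- the for-loop with the one_letter flag and the early 'return False'
def isAlphaOrSpaceLoop : List Char → Bool → Bool
  | [], one_letter => one_letter
  | c :: rest, one_letter =>
      if c == ' ' then isAlphaOrSpaceLoop rest one_letter
      else if !(PySem.Chars.isalpha c) then false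
      else isAlphaOrSpaceLoop rest true

def is_alpha_or_space (string : String) : Bool :=
  isAlphaOrSpaceLoop string.toList false

-- ===== PORT B =====
def is_alpha_or_space_alt (string : String) : Bool :=
  PySem.Str.strIsalpha (PySem.Str.replace string " " "")

-- ===== PRECONDITION & SPEC =====
def Spec_is_alpha_or_space (string : String) (out : Bool) : Prop := out = is_alpha_or_space_alt string
instance (string : String) (out : Bool) : Decidable (Spec_is_alpha_or_space string out) := by unfold Spec_is_alpha_or_space; infer_instance

-- ===== CLAIM (what is proved, stated in full; the proofs are below) =====
def Claim_equal_is_alpha_or_space : Prop := ∀ (string : String), Dom_is_alpha_or_space string → Spec_is_alpha_or_space string (is_alpha_or_space string)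

-- ===== LEMMAS AND PROOFS =====

-- replace.go with old = " ", new = "" filters out the spaces (given enough fuel)
theorem replace_go_space (fuel : Nat) (l acc : List Char) (h : l.length ≤ fuel) :
    PySem.Chars.replace.go [' '] [] fuel l acc
      = acc.reverse ++ l.filter (fun c => !(c == ' ')) := by
  induction fuel generalizing l acc with
  | zero =>
    cases l with
    | nil => simp [PySem.Chars.replace.go]
    | cons c t => simp at h
  | succ n ih =>
    cases l with
    | nil => simp [PySem.Chars.replace.go]
    | cons c t =>
      simp only [List.length_cons] at h
      by_cases hc : c = ' '
      · subst hc
        have : List.isPrefixOf [' '] (' ' :: t) = true := by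
          simp [List.isPrefixOf]
        simp [PySem.Chars.replace.go, this, ih t acc (by omega)]
      · have : List.isPrefixOf [' '] (c :: t) = false := by
          simp [List.isPrefixOf]; exact fun h => hc h.symm
        simp [PySem.Chars.replace.go, this, ih t (c :: acc) (by omega), hc]

theorem replace_space_eq_filter (l : List Char) :
    PySem.Chars.replace l [' '] [] = l.filter (fun c => !(c == ' ')) := by
  simpa using replace_go_space l.length l [] (le_refl _)

-- A's loop computes B's formula on the space-filtered list
theorem loop_eq (l : List Char) (flag : Bool) :
    isAlphaOrSpaceLoop l flag
      = ((flag || !(l.filter (fun c => !(c == ' '))).isEmpty)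
          && (l.filter (fun c => !(c == ' '))).all PySem.Chars.isalpha) := by
  induction l generalizing flag with
  | nil => cases flag <;> simp [isAlphaOrSpaceLoop]
  | cons c t ih =>
    by_cases hc : c = ' '
    · subst hc; simp [isAlphaOrSpaceLoop, ih]
    · by_cases ha : PySem.Chars.isalpha c = true
      · simp [isAlphaOrSpaceLoop, hc, ha, ih]
      · have ha' : PySem.Chars.isalpha c = false := by
          cases h : PySem.Chars.isalpha c <;> simp_all
        simp [isAlphaOrSpaceLoop, hc, ha']

-- ===== VERDICT (by name: the statement is the Claim_ definition above) =====
theorem is_alpha_or_space_spec : Claim_equal_is_alpha_or_space := by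
  intro s _
  unfold Spec_is_alpha_or_space is_alpha_or_space is_alpha_or_space_alt
  rw [loop_eq]
  simp [PySem.Str.strIsalpha, PySem.Str.replace, replace_space_eq_filter,
    PySem.Chars.strIsalpha]
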